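-- pv_equiv track=rewrite | github.com/kiung22/algorithm-problem-solving | Programmers/level1/신고결과받기.py | solution
-- ===== SOURCE A (Python) =====
-- def solution(id_list, report, k):
--     answer = [0] * len(id_list)
--     index = {x: i for i, x in enumerate(id_list)}
--     count = {x: 0 for x in id_list}
--     report_set = set(report)
--
--     for r in report_set:
--         count[r.split()[1]] += 1
--
--     for r in report_set:
--         user, reported = r.split()
--         if count[reported] >= k:
--             answer[index[user]] += 1
--
--     return answer
-- ===== SOURCE B (Python) =====
-- def solution(id_list, report, k):
--     # Gather formulation: tokenize the distinct report lines once, tally reports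
--     # per reported user, then compute each answer entry directly by counting the
--     # report pairs that credit that slot (instead of scattering += into answer).
--     pairs = [r.split() for r in set(report)]
--     cnt = {}
--     for _, v in pairs:
--         cnt[v] = cnt.get(v, 0) + 1
--     index = {x: i for i, x in enumerate(id_list)}
--     return [sum(1 for u, v in pairs if cnt[v] >= k and index[u] == i)
--             for i in range(len(id_list))]
-- ===== Notes on version B (the rewrite author's own statement) =====
-- stated objective: alternative
-- what changed: Replaces A's scatter loop (incrementing a pre-allocated answer list through an index dict) by a gather formulation: tokenize the deduplicated report lines once into pairs, tally per reported user, then compute each output slot directly as a count over the pairs; trades A's O(n+m) scatter for an O(n*m) gather.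
import Mathlib
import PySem

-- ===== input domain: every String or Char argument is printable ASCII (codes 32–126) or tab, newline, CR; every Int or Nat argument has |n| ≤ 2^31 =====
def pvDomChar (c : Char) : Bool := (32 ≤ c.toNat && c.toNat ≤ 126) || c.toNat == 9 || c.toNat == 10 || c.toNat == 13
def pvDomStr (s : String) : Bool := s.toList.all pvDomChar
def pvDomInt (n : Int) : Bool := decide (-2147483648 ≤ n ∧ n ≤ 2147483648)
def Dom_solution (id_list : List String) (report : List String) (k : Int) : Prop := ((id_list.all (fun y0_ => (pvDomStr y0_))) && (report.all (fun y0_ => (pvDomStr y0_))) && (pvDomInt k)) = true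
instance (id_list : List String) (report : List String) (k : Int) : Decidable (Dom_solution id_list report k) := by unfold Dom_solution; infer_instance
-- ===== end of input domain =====

-- B replaces A's scatter loop by a gather: one pass building the tally, then each
-- answer slot computed directly as a count over the tokenized report pairs
-- (alternative decomposition, not claimed faster).

-- ===== PORT A =====
def solution (id_list : List String) (report : List String) (k : Int) : List Int :=
  let answer := List.replicate id_list.length (0 : Int)
  let index : PySem.Dict String Int :=
    (PySem.List.enumerate id_list 0).foldl (fun d p => d.insert p.2 p.1) PySem.Dict.empty
  let count : PySem.Dict String Int :=
    id_list.foldl (fun d x => d.insert x (0 : Int)) PySem.Dict.empty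
  let report_set := PySem.Set.ofList report
  -- for r in report_set: count[r.split()[1]] += 1
  -- (IndexError on short lines / KeyError on unknown reported users excluded by Pre_)
  let count := report_set.foldl
    (fun d r => d.modify ((PySem.Str.split₀ r).getD 1 "") 0 (· + 1)) count
  -- for r in report_set: user, reported = r.split(); if count[reported] >= k: answer[index[user]] += 1
  -- (ValueError/KeyError excluded by Pre_; index values are in range by construction)
  let answer := report_set.foldl
    (fun a r =>
      let user := (PySem.Str.split₀ r).getD 0 ""
      let reported := (PySem.Str.split₀ r).getD 1 ""
      if count.getD reported 0 ≥ k then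
        PySem.List.pySetD a (index.getD user 0)
          (PySem.List.pyGetD a (index.getD user 0) 0 + 1)
      else a) answer
  answer

-- ===== PORT B =====
def solution_alt (id_list : List String) (report : List String) (k : Int) : List Int :=
  let pairs := (PySem.Set.ofList report).map PySem.Str.split₀
  -- for _, v in pairs: cnt[v] = cnt.get(v, 0) + 1   (unpack ValueError excluded by Pre_)
  let cnt : PySem.Dict String Int :=
    pairs.foldl (fun d p => d.insert (p.getD 1 "") (d.getD (p.getD 1 "") 0 + 1))
      PySem.Dict.empty
  let index : PySem.Dict String Int :=
    (PySem.List.enumerate id_list 0).foldl (fun d p => d.insert p.2 p.1) PySem.Dict.empty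
  -- [sum(1 for u, v in pairs if cnt[v] >= k and index[u] == i) for i in range(len(id_list))]
  -- (index[u] is only evaluated after cnt[v] >= k, Python's short-circuit; the KeyError
  --  reachable there is excluded by Pre_, so the -1 default is never the compared value)
  (PySem.List.pyRange 0 id_list.length 1).map (fun i =>
    pairs.foldl (fun s p =>
      if cnt.getD (p.getD 1 "") 0 ≥ k ∧ index.getD (p.getD 0 "") (-1) = i then s + 1 else s)
      (0 : Int))

-- ===== PRECONDITION & SPEC =====
-- Pre_ excludes exactly the inputs where Python A raises: a report line that does not
-- split into exactly two tokens, one whose reported user is not in id_list, or one whose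
-- reporter is not in id_list while the reported user's distinct-report tally reaches k
-- (only then does A's second loop evaluate index[user]).
def Pre_solution (id_list : List String) (report : List String) (k : Int) : Prop :=
  ∀ r ∈ report, (PySem.Str.split₀ r).length = 2 ∧
    (PySem.Str.split₀ r).getD 1 "" ∈ id_list ∧
    ((PySem.Str.split₀ r).getD 0 "" ∈ id_list ∨
      (((PySem.Set.ofList report).countP
          (fun r' => (PySem.Str.split₀ r').getD 1 "" == (PySem.Str.split₀ r).getD 1 "")) : Int) < k)
instance (id_list : List String) (report : List String) (k : Int) : Decidable (Pre_solution id_list report k) := by unfold Pre_solution; infer_instance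
def pvWitness_solution : List String × List String × Int := (["a", "b"], ["a b", "b a"], 1)


def Spec_solution (id_list : List String) (report : List String) (k : Int) (out : List Int) : Prop := out = solution_alt id_list report k
instance (id_list : List String) (report : List String) (k : Int) (out : List Int) : Decidable (Spec_solution id_list report k out) := by unfold Spec_solution; infer_instance

-- ===== CLAIM (what is proved, stated in full; the proofs are below) =====
def Claim_equal_solution : Prop := ∀ (id_list : List String) (report : List String) (k : Int), Dom_solution id_list report k → Pre_solution id_list report k → Spec_solution id_list report k (solution id_list report k)

-- ===== LEMMAS AND PROOFS =====


-- a fold inserting 0 for every id keeps every getD-at-0 equal to 0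
theorem getD_insert_zero_fold (xs : List String) (d : PySem.Dict String Int)
    (h : ∀ v, d.getD v (0 : Int) = 0) (v : String) :
    (xs.foldl (fun d x => d.insert x (0 : Int)) d).getD v 0 = 0 := by
  induction xs generalizing d with
  | nil => exact h v
  | cons y ys ih =>
    simp only [List.foldl_cons]
    refine ih _ (fun w => ?_)
    by_cases hw : w = y
    · subst hw; simp [PySem.Dict.getD_insert_self]
    · rw [PySem.Dict.getD_insert_of_ne _ _ _ hw]; exact h w

theorem dict_getD_of_get? {d : PySem.Dict String Int} {x : String} {j dflt : Int}
    (h : d.get? x = some j) : d.getD x dflt = j := by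
  simp [PySem.Dict.getD, h]

theorem dict_getD_of_get?_none {d : PySem.Dict String Int} {x : String} {dflt : Int}
    (h : d.get? x = none) : d.getD x dflt = dflt := by
  simp [PySem.Dict.getD, h]

-- the dict {x: i for i, x in enumerate(xs)}: every member maps to some in-range index
theorem enumFold_get? (xs : List String) (s : Int) (d : PySem.Dict String Int) (x : String) :
    (x ∉ xs → ((PySem.List.enumerate xs s).foldl (fun d p => d.insert p.2 p.1) d).get? x = d.get? x)
    ∧ (x ∈ xs → ∃ j : Int,
        ((PySem.List.enumerate xs s).foldl (fun d p => d.insert p.2 p.1) d).get? x = some j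
        ∧ s ≤ j ∧ j < s + xs.length) := by
  induction xs generalizing s d with
  | nil => simp [PySem.List.enumerate_nil]
  | cons y ys ih =>
    rw [PySem.List.enumerate_cons]
    simp only [List.foldl_cons]
    constructor
    · intro hx
      rw [(ih (s + 1) (d.insert y s)).1 (fun h => hx (List.mem_cons_of_mem _ h))]
      exact PySem.Dict.get?_insert_of_ne _ _ (fun h => hx (h ▸ List.mem_cons_self))
    · intro hx
      by_cases hys : x ∈ ys
      · rcases (ih (s + 1) (d.insert y s)).2 hys with ⟨j, hj, h1, h2⟩
        refine ⟨j, hj, by omega, ?_⟩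
        simp only [List.length_cons] at *
        push_cast at h2 ⊢
        omega
      · have hxy : x = y := by
          rcases List.mem_cons.mp hx with h | h
          · exact h
          · exact absurd h hys
        subst hxy
        rw [(ih (s + 1) (d.insert x s)).1 hys, PySem.Dict.get?_insert_self]
        refine ⟨s, rfl, le_refl s, ?_⟩
        simp only [List.length_cons]
        push_cast
        omega

-- sum(1 for p in L if q(p)) as a fold equals countP
theorem foldl_ite_add_one {α : Type} (q : α → Prop) [DecidablePred q] (L : List α) (c : Int) :
    L.foldl (fun s p => if q p then s + 1 else s) c = c + (L.countP (fun p => decide (q p)) : Int) := by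
  induction L generalizing c with
  | nil => simp
  | cons p L ih =>
    simp only [List.foldl_cons, List.countP_cons, ih]
    split <;> simp_all
    omega

-- the scatter loop: each slot ends as its start plus the number of events that hit it
theorem scatter_getElem? (c : String → Prop) [DecidablePred c] (t : String → Int)
    (E : List String) (a : List Int)
    (ht : ∀ r ∈ E, 0 ≤ t r ∧ t r < (a.length : Int)) (m : Nat) :
    (E.foldl (fun a r => if c r then
        PySem.List.pySetD a (t r) (PySem.List.pyGetD a (t r) 0 + 1) else a) a)[m]?
    = a[m]?.map (fun x => x + (E.countP (fun r => decide (c r ∧ t r = (m : Int))) : Int)) := by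
  induction E generalizing a with
  | nil => cases h : a[m]? <;> simp [h]
  | cons r E ih =>
    simp only [List.foldl_cons]
    have hr := ht r List.mem_cons_self
    by_cases hc : c r
    · rw [if_pos hc]
      rw [PySem.List.pySetD_of_nonneg _ _ hr.1]
      have hlen : ((a.set (t r).toNat (PySem.List.pyGetD a (t r) 0 + 1)).length : Int) = (a.length : Int) := by
        simp
      rw [ih _ (fun r' h' => hlen ▸ ht r' (List.mem_cons_of_mem _ h'))]
      have hcnt : ∀ p : Nat,
          ((r :: E).countP (fun r => decide (c r ∧ t r = (p : Int))) : Nat)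
          = E.countP (fun r => decide (c r ∧ t r = (p : Int))) + (if t r = (p : Int) then 1 else 0) := by
        intro p
        rw [List.countP_cons]
        by_cases hp : t r = (p : Int) <;> simp [hp, hc]
      by_cases hm : (t r).toNat = m
      · have htr : t r = (m : Int) := by omega
        have hmlt : m < a.length := by omega
        have hv : PySem.List.pyGetD a (t r) 0 = a[m] := by
          rw [PySem.List.pyGetD_of_nonneg _ _ hr.1, hm]
          simp [List.getD, List.getElem?_eq_getElem hmlt]
        rw [htr] at hv
        rw [hm, List.getElem?_set_self', List.getElem?_eq_getElem hmlt]
        simp [hv, hc, htr]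
        ring
      · rw [List.getElem?_set_ne hm]
        cases h : a[m]? with
        | none => simp
        | some x =>
          have htr : ¬ t r = (m : Int) := by omega
          simp [htr]
    · rw [if_neg hc]
      rw [ih _ (fun r' h' => ht r' (List.mem_cons_of_mem _ h'))]
      have : ((r :: E).countP (fun r => decide (c r ∧ t r = (m : Int))) : Nat)
          = E.countP (fun r => decide (c r ∧ t r = (m : Int))) := by
        rw [List.countP_cons]; simp [hc]
      rw [this]

-- counting loop keyed through a function: final tally = start + occurrences of the key
theorem foldl_modify_key_getD {α : Type} (key : α → String) (L : List α)
    (d : PySem.Dict String Int) (v : String) :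
    (L.foldl (fun d r => d.modify (key r) 0 (· + 1)) d).getD v 0
      = d.getD v 0 + ((L.map key).count v : Int) := by
  induction L generalizing d with
  | nil => simp
  | cons r L ih =>
    simp only [List.foldl_cons, ih, List.map_cons, List.count_cons]
    rw [PySem.Dict.getD_modify]
    by_cases h : v = key r
    · subst h
      simp
      ring
    · have h2 : ¬ key r = v := fun hh => h hh.symm
      simp [h, h2]

theorem foldl_insert_key_getD {α : Type} (key : α → String) (L : List α)
    (d : PySem.Dict String Int) (v : String) :
    (L.foldl (fun d r => d.insert (key r) (d.getD (key r) 0 + 1)) d).getD v 0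
      = d.getD v 0 + ((L.map key).count v : Int) := by
  induction L generalizing d with
  | nil => simp
  | cons r L ih =>
    simp only [List.foldl_cons, ih, List.map_cons, List.count_cons]
    rw [PySem.Dict.getD_insert]
    by_cases h : v = key r
    · subst h
      simp
      ring
    · have h2 : ¬ key r = v := fun hh => h hh.symm
      simp [h, h2]

theorem solution_equal (id_list : List String) (report : List String) (k : Int)
    (hpre : Pre_solution id_list report k) :
    solution id_list report k = solution_alt id_list report k := by
  unfold solution solution_alt
  dsimp only
  apply List.ext_getElem?
  intro m
  -- names for the shared pieces
  set S := PySem.Set.ofList report with hS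
  set idx : PySem.Dict String Int :=
    (PySem.List.enumerate id_list 0).foldl (fun d p => d.insert p.2 p.1) PySem.Dict.empty with hidx
  set cA : PySem.Dict String Int := S.foldl
      (fun d r => d.modify ((PySem.Str.split₀ r).getD 1 "") 0 (· + 1))
      (id_list.foldl (fun d x => d.insert x (0 : Int)) PySem.Dict.empty) with hcA
  set cB : PySem.Dict String Int := (S.map PySem.Str.split₀).foldl
      (fun d p => d.insert (p.getD 1 "") (d.getD (p.getD 1 "") 0 + 1)) PySem.Dict.empty with hcB
  -- both count dicts read back the same tally
  have hAcnt : ∀ v, cA.getD v 0 = ((S.map (fun r => (PySem.Str.split₀ r).getD 1 "")).count v : Int) := by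
    intro v
    rw [hcA, foldl_modify_key_getD (fun r => (PySem.Str.split₀ r).getD 1 "") S _ v,
      getD_insert_zero_fold id_list _ (fun w => PySem.Dict.getD_empty w 0) v]
    simp
  have hBcnt : ∀ v, cB.getD v 0 = ((S.map (fun r => (PySem.Str.split₀ r).getD 1 "")).count v : Int) := by
    intro v
    rw [hcB, foldl_insert_key_getD (fun p : List String => p.getD 1 "") (S.map PySem.Str.split₀) _ v,
      PySem.Dict.getD_empty, List.map_map]
    simp [Function.comp_def, List.getD]
  -- the count the Pre_ clause mentions is the one both dicts hold
  have hPcnt : ∀ r, ((S.countP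
        (fun r' => (PySem.Str.split₀ r').getD 1 "" == (PySem.Str.split₀ r).getD 1 "")) : Int)
      = ((S.map (fun r => (PySem.Str.split₀ r).getD 1 "")).count ((PySem.Str.split₀ r).getD 1 "") : Int) := by
    intro r
    rw [List.count_eq_countP, List.countP_map]
    rfl
  -- Pre_ transported to members of S
  have hmemS : ∀ r ∈ S, (PySem.Str.split₀ r).getD 1 "" ∈ id_list
      ∧ ((PySem.Str.split₀ r).getD 0 "" ∈ id_list
          ∨ ((S.map (fun r => (PySem.Str.split₀ r).getD 1 "")).count ((PySem.Str.split₀ r).getD 1 "") : Int) < k) := by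
    intro r hr
    have h := hpre r (by rwa [hS, PySem.Set.mem_ofList] at hr)
    refine ⟨h.2.1, ?_⟩
    rcases h.2.2 with h0 | h0
    · exact Or.inl h0
    · refine Or.inr ?_
      rw [← hPcnt r, hS]
      exact h0
  -- the index dict sends members to in-range indices, non-members to none
  have hidxmem : ∀ x ∈ id_list, ∃ j : Int, idx.get? x = some j ∧ 0 ≤ j ∧ j < id_list.length := by
    intro x hx
    rcases (enumFold_get? id_list 0 PySem.Dict.empty x).2 hx with ⟨j, hj, h1, h2⟩
    exact ⟨j, hj, h1, by omega⟩
  have hidxnone : ∀ x, x ∉ id_list → idx.get? x = none := by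
    intro x hx
    rw [hidx, (enumFold_get? id_list 0 PySem.Dict.empty x).1 hx]
    exact PySem.Dict.get?_empty x
  -- bounds for A's scatter: either the reporter is a member (in-range index), or the
  -- default 0 is used, in range because the reported user witnesses id_list ≠ []
  have ht : ∀ r ∈ S, 0 ≤ idx.getD ((PySem.Str.split₀ r).getD 0 "") 0
      ∧ idx.getD ((PySem.Str.split₀ r).getD 0 "") 0 < ((List.replicate id_list.length (0 : Int)).length : Int) := by
    intro r hr
    by_cases hu : (PySem.Str.split₀ r).getD 0 "" ∈ id_list
    · rcases hidxmem _ hu with ⟨j, hj, h1, h2⟩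
      rw [dict_getD_of_get? hj]
      simpa using ⟨h1, h2⟩
    · have h0 : idx.getD ((PySem.Str.split₀ r).getD 0 "") 0 = 0 :=
        dict_getD_of_get?_none (hidxnone _ hu)
      have hne : 0 < id_list.length := List.length_pos_of_mem (hmemS r hr).1
      rw [h0]
      simp
      omega
  rw [scatter_getElem? (fun r => cA.getD ((PySem.Str.split₀ r).getD 1 "") 0 ≥ k)
      (fun r => idx.getD ((PySem.Str.split₀ r).getD 0 "") 0) S
      (List.replicate id_list.length (0 : Int)) ht m]
  by_cases hmn : m < id_list.length
  · rw [PySem.List.getElem?_map_pyRange_zero _ id_list.length m hmn,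
      foldl_ite_add_one (fun p : List String =>
        cB.getD (p.getD 1 "") 0 ≥ k ∧ idx.getD (p.getD 0 "") (-1) = (m : Int))]
    rw [List.getElem?_replicate, if_pos hmn]
    simp only [Option.map_some, Option.some.injEq, zero_add]
    rw [List.countP_map]
    congr 1
    apply List.countP_congr
    intro r hr
    simp only [Function.comp_apply]
    rw [decide_eq_true_eq, decide_eq_true_eq, hAcnt, hBcnt]
    by_cases hk :
        ((S.map (fun r => (PySem.Str.split₀ r).getD 1 "")).count ((PySem.Str.split₀ r).getD 1 "") : Int) ≥ k
    · -- tally reaches k: Pre_ forces the reporter to be a member, both lookups agree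
      have hu : (PySem.Str.split₀ r).getD 0 "" ∈ id_list := by
        rcases (hmemS r hr).2 with h | h
        · exact h
        · omega
      rcases hidxmem _ hu with ⟨j, hj, _, _⟩
      rw [dict_getD_of_get? (dflt := 0) hj, dict_getD_of_get? (dflt := -1) hj]
    · constructor <;> rintro ⟨h1, -⟩ <;> exact absurd h1 hk
  · have h1 : (List.replicate id_list.length (0 : Int))[m]? = none := by
      simp [List.getElem?_replicate]
      omega
    rw [h1]
    simp only [Option.map_none]
    refine (List.getElem?_eq_none ?_).symm
    simp [PySem.List.length_pyRange_one]
    omega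

-- ===== VERDICT (by name: the statement is the Claim_ definition above) =====
theorem solution_spec : Claim_equal_solution := by
  intro ids rep k _ hpre
  unfold Spec_solution
  exact solution_equal ids rep k hpre
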